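-- pv_equiv track=rewrite | github.com/ZairMontoyaUni/Proyecto-2-dalgo | ProblemaP2.py | construccion_grafo
-- ===== SOURCE A (Python) =====
-- from collections import defaultdict
--
-- def construccion_grafo(n, energia, robots, powers):
--     grafo = defaultdict(list)
--
--     for i in range(n):
--         if i in robots:
--             continue
--
--         if i + 1 < n and (i + 1) not in robots:
--             grafo[i].append((i+1, "C+"))
--         if i - 1 < n and (i - 1) not in robots:
--             grafo[i].append((i-1, "C-"))
--
--         for j in range(n):
--             if j != i and j not in robots:
--                 saltos = (j - i)
--                 if abs(saltos) <= energia: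
--                     grafo[i].append((j, "T"+str(saltos)))
--
--     for i, salto in powers.items():
--         if i in robots:
--             continue
--         if i + salto < n and (i + salto) not in robots:
--             grafo[i].append((i + salto, "S+"))
--         if i - salto < n and (i - salto) not in robots:
--             grafo[i].append((i - salto, "S-"))
--
--     return grafo
-- ===== SOURCE B (Python) =====
-- from collections import defaultdict
--
-- def construccion_grafo(n, energia, robots, powers):
--     grafo = defaultdict(list)
--     for i in range(n):
--         if i in robots:
--             continue
--         edges = []
--         if i + 1 < n and (i + 1) not in robots:
--             edges.append((i + 1, "C+"))
--         if (i - 1) not in robots: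
--             edges.append((i - 1, "C-"))
--         lo = max(0, i - energia)
--         hi = min(n, i + energia + 1)
--         for j in range(lo, hi):
--             if j != i and j not in robots:
--                 edges.append((j, "T" + str(j - i)))
--         if edges:
--             grafo[i] = edges
--     for i, salto in powers.items():
--         if i in robots:
--             continue
--         extra = []
--         if i + salto < n and (i + salto) not in robots:
--             extra.append((i + salto, "S+"))
--         if i - salto < n and (i - salto) not in robots:
--             extra.append((i - salto, "S-"))
--         if extra:
--             grafo[i] = grafo.get(i, []) + extra
--     return grafo
-- ===== Notes on version B (the rewrite author's own statement) =====
-- stated objective: alternative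
-- what changed: B replaces A's inner scan over all positions j with a scan of only the clamped window [max(0,i-energia), min(n-1,i+energia)] (outside it |j-i|<=energia can never hold), and builds each node's edge list once, storing it with a single dict assignment instead of per-edge defaultdict appends.
import Mathlib
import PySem

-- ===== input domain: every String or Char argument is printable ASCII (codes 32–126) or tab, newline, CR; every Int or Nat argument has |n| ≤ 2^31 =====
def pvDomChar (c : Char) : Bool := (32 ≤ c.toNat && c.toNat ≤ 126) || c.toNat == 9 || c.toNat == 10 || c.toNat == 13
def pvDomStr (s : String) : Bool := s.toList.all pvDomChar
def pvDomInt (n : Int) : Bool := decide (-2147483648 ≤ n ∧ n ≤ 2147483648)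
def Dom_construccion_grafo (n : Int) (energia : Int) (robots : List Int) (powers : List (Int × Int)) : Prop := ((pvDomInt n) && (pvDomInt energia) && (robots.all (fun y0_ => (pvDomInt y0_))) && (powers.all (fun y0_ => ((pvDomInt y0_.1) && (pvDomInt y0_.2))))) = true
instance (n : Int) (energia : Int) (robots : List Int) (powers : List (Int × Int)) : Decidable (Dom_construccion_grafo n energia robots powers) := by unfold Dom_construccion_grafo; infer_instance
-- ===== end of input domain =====

-- ===== PORT A =====
-- literal port of A: defaultdict(list) is a PySem.Dict; grafo[i].append(e) is modify i [] (· ++ [e])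
def construccion_grafo (n : Int) (energia : Int) (robots : List Int) (powers : List (Int × Int)) : List (Int × List (Int × String)) :=
  (powers.foldl (fun g p =>
    if robots.contains p.1 then g
    else
      let g := if p.1 + p.2 < n ∧ robots.contains (p.1 + p.2) = false then g.modify p.1 [] (· ++ [(p.1 + p.2, "S+")]) else g
      if p.1 - p.2 < n ∧ robots.contains (p.1 - p.2) = false then g.modify p.1 [] (· ++ [(p.1 - p.2, "S-")]) else g)
    ((PySem.List.pyRange 0 n 1).foldl (fun g i =>
      if robots.contains i then g
      else
        let g := if i + 1 < n ∧ robots.contains (i + 1) = false then g.modify i [] (· ++ [(i + 1, "C+")]) else g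
        let g := if i - 1 < n ∧ robots.contains (i - 1) = false then g.modify i [] (· ++ [(i - 1, "C-")]) else g
        (PySem.List.pyRange 0 n 1).foldl (fun g j =>
          if j ≠ i ∧ robots.contains j = false then
            let saltos := j - i
            if |saltos| ≤ energia then g.modify i [] (· ++ [(j, "T" ++ PySem.Int.toStr saltos)]) else g
          else g) g) (PySem.Dict.empty : PySem.Dict Int (List (Int × String))))).items

-- ===== PORT B =====
-- B: per-node edge list built once; the T-edge scan is restricted to the clamped window [i-energia, i+energia] instead of all of range(n)
def bEdges (n : Int) (energia : Int) (robots : List Int) (i : Int) : List (Int × String) :=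
  (if i + 1 < n ∧ robots.contains (i + 1) = false then [(i + 1, "C+")] else []) ++
  (if robots.contains (i - 1) = false then [(i - 1, "C-")] else []) ++
  ((PySem.List.pyRange (max 0 (i - energia)) (min n (i + energia + 1)) 1).filter
      (fun j => j != i && !(robots.contains j))).map (fun j => (j, "T" ++ PySem.Int.toStr (j - i)))

def bExtra (n : Int) (robots : List Int) (i : Int) (salto : Int) : List (Int × String) :=
  (if i + salto < n ∧ robots.contains (i + salto) = false then [(i + salto, "S+")] else []) ++
  (if i - salto < n ∧ robots.contains (i - salto) = false then [(i - salto, "S-")] else [])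

def construccion_grafo_alt (n : Int) (energia : Int) (robots : List Int) (powers : List (Int × Int)) : List (Int × List (Int × String)) :=
  (powers.foldl (fun g p =>
    if robots.contains p.1 then g
    else
      let extra := bExtra n robots p.1 p.2
      if extra.isEmpty then g else g.insert p.1 (g.getD p.1 [] ++ extra))
    ((PySem.List.pyRange 0 n 1).foldl (fun g i =>
      if robots.contains i then g
      else
        let edges := bEdges n energia robots i
        if edges.isEmpty then g else g.insert i edges)
      (PySem.Dict.empty : PySem.Dict Int (List (Int × String))))).items

-- ===== PRECONDITION & SPEC =====
def Spec_construccion_grafo (n : Int) (energia : Int) (robots : List Int) (powers : List (Int × Int)) (out : List (Int × List (Int × String))) : Prop := out = construccion_grafo_alt n energia robots powers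
instance (n : Int) (energia : Int) (robots : List Int) (powers : List (Int × Int)) (out : List (Int × List (Int × String))) : Decidable (Spec_construccion_grafo n energia robots powers out) := by unfold Spec_construccion_grafo; infer_instance

-- ===== CLAIM (what is proved, stated in full; the proofs are below) =====
def Claim_equal_construccion_grafo : Prop := ∀ (n : Int) (energia : Int) (robots : List Int) (powers : List (Int × Int)), Dom_construccion_grafo n energia robots powers → Spec_construccion_grafo n energia robots powers (construccion_grafo n energia robots powers)

-- ===== LEMMAS AND PROOFS =====

-- 'append l to the list at key k, creating it only when l is nonempty' — the shape of A's conditional appends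
def dapp (g : PySem.Dict Int (List (Int × String))) (k : Int) (l : List (Int × String)) : PySem.Dict Int (List (Int × String)) :=
  if l = [] then g else g.modify k [] (· ++ l)

theorem modify_eq_insert_getD (g : PySem.Dict Int (List (Int × String))) (k : Int) (f : List (Int × String) → List (Int × String)) :
    g.modify k [] f = g.insert k (f (g.getD k [])) := rfl

theorem dapp_append (g : PySem.Dict Int (List (Int × String))) (k : Int) (l1 l2 : List (Int × String)) :
    dapp (dapp g k l1) k l2 = dapp g k (l1 ++ l2) := by
  rcases eq_or_ne l1 [] with h1 | h1
  · simp [dapp, h1]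
  rcases eq_or_ne l2 [] with h2 | h2
  · simp [dapp, h1, h2]
  have hne : l1 ++ l2 ≠ [] := by simp [h1]
  simp only [dapp, if_neg h1, if_neg h2, if_neg hne]
  rw [modify_eq_insert_getD, modify_eq_insert_getD, modify_eq_insert_getD]
  rw [PySem.Dict.getD_insert_self, PySem.Dict.insert_insert_self, List.append_assoc]

theorem cond_dapp (g : PySem.Dict Int (List (Int × String))) (k : Int) (c : Prop) [Decidable c] (e : Int × String) :
    (if c then g.modify k [] (· ++ [e]) else g) = dapp g k (if c then [e] else []) := by
  by_cases h : c <;> simp [dapp, h]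

theorem foldl_dapp (l : List Int) (p : Int → Prop) [DecidablePred p] (f : Int → Int × String)
    (g : PySem.Dict Int (List (Int × String))) (k : Int) :
    l.foldl (fun g j => if p j then g.modify k [] (· ++ [f j]) else g) g
      = dapp g k ((l.filter (fun j => decide (p j))).map f) := by
  induction l generalizing g with
  | nil => simp [dapp]
  | cons x xs ih =>
    by_cases hx : p x
    · simp only [List.foldl_cons, List.filter_cons, decide_eq_true hx, if_pos hx]
      rw [ih]
      have h2 : PySem.Dict.modify g k [] (· ++ [f x]) = dapp g k [f x] := by simp [dapp]
      rw [h2, dapp_append]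
      simp
    · simp only [List.foldl_cons, List.filter_cons, if_neg hx]
      rw [ih]
      simp [hx]

-- the window: filtering the full range with the |j-i| ≤ energia test equals filtering the clamped window without it
theorem window_filter (n energia i : Int) (q : Int → Bool) (h0 : 0 ≤ i) (hn : i < n) :
    (PySem.List.pyRange 0 n 1).filter (fun j => q j && decide (|j - i| ≤ energia))
      = (PySem.List.pyRange (max 0 (i - energia)) (min n (i + energia + 1)) 1).filter q := by
  set a := max 0 (i - energia) with ha
  set b := min n (i + energia + 1) with hb
  rcases lt_or_ge energia 0 with hneg | hpos
  · rw [PySem.List.pyRange_one_eq_nil (a := a) (b := b) (by omega), List.filter_nil,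
      List.filter_eq_nil_iff]
    intro j _
    have hj : ¬ (|j - i| ≤ energia) := by
      have := abs_nonneg (j - i); omega
    simp [hj]
  · have hab1 : (0 : Int) ≤ a := by omega
    have hab2 : a ≤ b := by omega
    have hab3 : b ≤ n := by omega
    rw [PySem.List.pyRange_one_append (a := 0) (m := a) (b := n) hab1 (by omega),
        PySem.List.pyRange_one_append (a := a) (m := b) (b := n) hab2 hab3,
        List.filter_append, List.filter_append]
    have hleft : (PySem.List.pyRange 0 a 1).filter (fun j => q j && decide (|j - i| ≤ energia)) = [] := by
      rw [List.filter_eq_nil_iff]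
      intro j hj
      rw [PySem.List.mem_pyRange_one] at hj
      have hj2 : ¬ (|j - i| ≤ energia) := by rw [abs_le]; omega
      simp [hj2]
    have hright : (PySem.List.pyRange b n 1).filter (fun j => q j && decide (|j - i| ≤ energia)) = [] := by
      rw [List.filter_eq_nil_iff]
      intro j hj
      rw [PySem.List.mem_pyRange_one] at hj
      have hj2 : ¬ (|j - i| ≤ energia) := by rw [abs_le]; omega
      simp [hj2]
    have hmid : (PySem.List.pyRange a b 1).filter (fun j => q j && decide (|j - i| ≤ energia))
        = (PySem.List.pyRange a b 1).filter q := by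
      apply List.filter_congr
      intro j hj
      rw [PySem.List.mem_pyRange_one] at hj
      have hj2 : |j - i| ≤ energia := by rw [abs_le]; omega
      simp [hj2]
    rw [hleft, hright, hmid, List.nil_append, List.append_nil]

-- A's per-node body, normalised: skip robots, else append the whole edge list at key i in one dapp
theorem bodyA_norm (n energia : Int) (robots : List Int) (g : PySem.Dict Int (List (Int × String))) (i : Int)
    (h0 : 0 ≤ i) (hn : i < n) :
    (if robots.contains i then g
     else
       let g := if i + 1 < n ∧ robots.contains (i + 1) = false then g.modify i [] (· ++ [(i + 1, "C+")]) else g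
       let g := if i - 1 < n ∧ robots.contains (i - 1) = false then g.modify i [] (· ++ [(i - 1, "C-")]) else g
       (PySem.List.pyRange 0 n 1).foldl (fun g j =>
         if j ≠ i ∧ robots.contains j = false then
           let saltos := j - i
           if |saltos| ≤ energia then g.modify i [] (· ++ [(j, "T" ++ PySem.Int.toStr saltos)]) else g
         else g) g)
    = (if robots.contains i then g else dapp g i (bEdges n energia robots i)) := by
  by_cases hr : robots.contains i
  · rw [if_pos hr, if_pos hr]
  rw [if_neg hr, if_neg hr]
  show ((PySem.List.pyRange 0 n 1).foldl _
      (if i - 1 < n ∧ robots.contains (i - 1) = false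
        then (if i + 1 < n ∧ robots.contains (i + 1) = false then g.modify i [] (· ++ [(i + 1, "C+")]) else g).modify i [] (· ++ [(i - 1, "C-")])
        else (if i + 1 < n ∧ robots.contains (i + 1) = false then g.modify i [] (· ++ [(i + 1, "C+")]) else g)))
    = dapp g i (bEdges n energia robots i)
  have hbody : (fun (g : PySem.Dict Int (List (Int × String))) j =>
      if j ≠ i ∧ robots.contains j = false then
        let saltos := j - i
        if |saltos| ≤ energia then g.modify i [] (· ++ [(j, "T" ++ PySem.Int.toStr saltos)]) else g
      else g)
      = (fun (g : PySem.Dict Int (List (Int × String))) j =>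
        if (j ≠ i ∧ robots.contains j = false) ∧ |j - i| ≤ energia then
          g.modify i [] (· ++ [(j, "T" ++ PySem.Int.toStr (j - i))]) else g) := by
    funext g j
    by_cases h1 : j ≠ i ∧ robots.contains j = false <;> by_cases h2 : |j - i| ≤ energia <;>
      simp [h1, h2]
  rw [hbody, foldl_dapp (p := fun j => (j ≠ i ∧ robots.contains j = false) ∧ |j - i| ≤ energia)]
  have hq : (fun j => decide ((j ≠ i ∧ robots.contains j = false) ∧ |j - i| ≤ energia))
      = (fun j => (j != i && !(robots.contains j)) && decide (|j - i| ≤ energia)) := by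
    funext j
    by_cases h1 : j = i <;> by_cases h2 : robots.contains j <;> by_cases h3 : |j - i| ≤ energia <;>
      simp [h1, h3]

  rw [hq, window_filter n energia i _ h0 hn]
  have hCplus : (if i + 1 < n ∧ robots.contains (i + 1) = false then g.modify i [] (· ++ [(i + 1, "C+")]) else g)
      = dapp g i (if i + 1 < n ∧ robots.contains (i + 1) = false then [(i + 1, "C+")] else []) := cond_dapp ..
  rw [hCplus]
  rw [show (if i - 1 < n ∧ robots.contains (i - 1) = false
        then (dapp g i (if i + 1 < n ∧ robots.contains (i + 1) = false then [(i + 1, "C+")] else [])).modify i [] (· ++ [(i - 1, "C-")])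
        else dapp g i (if i + 1 < n ∧ robots.contains (i + 1) = false then [(i + 1, "C+")] else []))
      = dapp (dapp g i (if i + 1 < n ∧ robots.contains (i + 1) = false then [(i + 1, "C+")] else [])) i
          (if i - 1 < n ∧ robots.contains (i - 1) = false then [(i - 1, "C-")] else []) from cond_dapp ..]
  rw [dapp_append, dapp_append]
  congr 1
  have hC : (i - 1 < n ∧ robots.contains (i - 1) = false) = (robots.contains (i - 1) = false) := by
    have h5 : i - 1 < n := by omega
    simp [h5]
  simp only [bEdges, hC, List.append_assoc]

-- on fresh keys, dapp (A) and 'insert when nonempty' (B) agree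
theorem dapp_fresh (g : PySem.Dict Int (List (Int × String))) (k : Int) (l : List (Int × String))
    (h : g.contains k = false) :
    dapp g k l = (if l.isEmpty then g else g.insert k l) := by
  rcases eq_or_ne l [] with h1 | h1
  · simp [dapp, h1]
  have h2 : l.isEmpty = false := by simpa [List.isEmpty_iff] using h1
  rw [h2]
  simp only [dapp, if_neg h1, Bool.false_eq_true, if_false]
  rw [modify_eq_insert_getD, PySem.Dict.getD_of_not_contains g [] h, List.nil_append]

-- loop 1: A's and B's first passes agree as long as every key of the accumulator is fresh for the remaining indices
theorem loop1_eq (n energia : Int) (robots : List Int) :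
    ∀ (l : List Int), l.Nodup → ∀ (g : PySem.Dict Int (List (Int × String))),
      (∀ j ∈ l, g.contains j = false) →
      l.foldl (fun g i => if robots.contains i then g else dapp g i (bEdges n energia robots i)) g
        = l.foldl (fun g i =>
            if robots.contains i then g
            else
              let edges := bEdges n energia robots i
              if edges.isEmpty then g else g.insert i edges) g := by
  intro l
  induction l with
  | nil => intro _ g _; rfl
  | cons x xs ih =>
    intro hnd g hfresh
    have hx : g.contains x = false := hfresh x (by simp)
    have hnd' : xs.Nodup := (List.nodup_cons.mp hnd).2
    have hxnot : x ∉ xs := (List.nodup_cons.mp hnd).1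
    simp only [List.foldl_cons]
    rw [dapp_fresh g x _ hx]
    apply ih hnd'
    intro j hj
    have hjx : j ≠ x := fun h => hxnot (h ▸ hj)
    have hgj : g.contains j = false := hfresh j (by simp [hj])
    by_cases hr : robots.contains x
    · rw [if_pos hr]; exact hgj
    rw [if_neg hr]
    show ((if (bEdges n energia robots x).isEmpty then g else g.insert x (bEdges n energia robots x)).contains j) = false
    by_cases he : (bEdges n energia robots x).isEmpty
    · rw [if_pos he]; exact hgj
    · rw [if_neg he, PySem.Dict.contains_insert]
      simp [hjx, hgj]

-- loop 2: A's and B's power passes have pointwise-equal bodies (B's insert-with-getD is exactly A's modify)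
theorem body2_eq (n : Int) (robots : List Int) (g : PySem.Dict Int (List (Int × String))) (p : Int × Int) :
    (if robots.contains p.1 then g
     else
       let g := if p.1 + p.2 < n ∧ robots.contains (p.1 + p.2) = false then g.modify p.1 [] (· ++ [(p.1 + p.2, "S+")]) else g
       if p.1 - p.2 < n ∧ robots.contains (p.1 - p.2) = false then g.modify p.1 [] (· ++ [(p.1 - p.2, "S-")]) else g)
    = (if robots.contains p.1 then g
       else
         let extra := bExtra n robots p.1 p.2
         if extra.isEmpty then g else g.insert p.1 (g.getD p.1 [] ++ extra)) := by
  by_cases hr : robots.contains p.1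
  · rw [if_pos hr, if_pos hr]
  rw [if_neg hr, if_neg hr]
  show (if p.1 - p.2 < n ∧ robots.contains (p.1 - p.2) = false
      then (if p.1 + p.2 < n ∧ robots.contains (p.1 + p.2) = false then g.modify p.1 [] (· ++ [(p.1 + p.2, "S+")]) else g).modify p.1 [] (· ++ [(p.1 - p.2, "S-")])
      else (if p.1 + p.2 < n ∧ robots.contains (p.1 + p.2) = false then g.modify p.1 [] (· ++ [(p.1 + p.2, "S+")]) else g))
    = (if (bExtra n robots p.1 p.2).isEmpty then g else g.insert p.1 (g.getD p.1 [] ++ bExtra n robots p.1 p.2))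
  rw [cond_dapp (c := p.1 + p.2 < n ∧ robots.contains (p.1 + p.2) = false)]
  rw [show (if p.1 - p.2 < n ∧ robots.contains (p.1 - p.2) = false
      then (dapp g p.1 (if p.1 + p.2 < n ∧ robots.contains (p.1 + p.2) = false then [(p.1 + p.2, "S+")] else [])).modify p.1 [] (· ++ [(p.1 - p.2, "S-")])
      else dapp g p.1 (if p.1 + p.2 < n ∧ robots.contains (p.1 + p.2) = false then [(p.1 + p.2, "S+")] else []))
    = dapp (dapp g p.1 (if p.1 + p.2 < n ∧ robots.contains (p.1 + p.2) = false then [(p.1 + p.2, "S+")] else [])) p.1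
        (if p.1 - p.2 < n ∧ robots.contains (p.1 - p.2) = false then [(p.1 - p.2, "S-")] else []) from cond_dapp ..]
  rw [dapp_append]
  show dapp g p.1 (bExtra n robots p.1 p.2) = _
  rcases eq_or_ne (bExtra n robots p.1 p.2) [] with h1 | h1
  · simp [dapp, h1]
  · have h2 : (bExtra n robots p.1 p.2).isEmpty = false := by simpa [List.isEmpty_iff] using h1
    rw [h2]
    simp only [dapp, if_neg h1, Bool.false_eq_true, if_false]
    rw [modify_eq_insert_getD]

-- ===== VERDICT (by name: the statement is the Claim_ definition above) =====
theorem construccion_grafo_spec : Claim_equal_construccion_grafo := by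
  intro n energia robots powers _
  unfold Spec_construccion_grafo construccion_grafo construccion_grafo_alt
  have h1 : (PySem.List.pyRange 0 n 1).foldl (fun g i =>
      if robots.contains i then g
      else
        let g := if i + 1 < n ∧ robots.contains (i + 1) = false then g.modify i [] (· ++ [(i + 1, "C+")]) else g
        let g := if i - 1 < n ∧ robots.contains (i - 1) = false then g.modify i [] (· ++ [(i - 1, "C-")]) else g
        (PySem.List.pyRange 0 n 1).foldl (fun g j =>
          if j ≠ i ∧ robots.contains j = false then
            let saltos := j - i
            if |saltos| ≤ energia then g.modify i [] (· ++ [(j, "T" ++ PySem.Int.toStr saltos)]) else g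
          else g) g) (PySem.Dict.empty : PySem.Dict Int (List (Int × String)))
      = (PySem.List.pyRange 0 n 1).foldl (fun g i =>
          if robots.contains i then g
          else
            let edges := bEdges n energia robots i
            if edges.isEmpty then g else g.insert i edges) PySem.Dict.empty := by
    have step1 := PySem.List.foldl_congr_mem
      (l := PySem.List.pyRange 0 n 1)
      (init := (PySem.Dict.empty : PySem.Dict Int (List (Int × String))))
      (g := fun g i => if robots.contains i then g else dapp g i (bEdges n energia robots i))
      (f := fun g i =>
        if robots.contains i then g
        else
          let g := if i + 1 < n ∧ robots.contains (i + 1) = false then g.modify i [] (· ++ [(i + 1, "C+")]) else g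
          let g := if i - 1 < n ∧ robots.contains (i - 1) = false then g.modify i [] (· ++ [(i - 1, "C-")]) else g
          (PySem.List.pyRange 0 n 1).foldl (fun g j =>
            if j ≠ i ∧ robots.contains j = false then
              let saltos := j - i
              if |saltos| ≤ energia then g.modify i [] (· ++ [(j, "T" ++ PySem.Int.toStr saltos)]) else g
            else g) g)
      (by
        intro acc x hx
        rw [PySem.List.mem_pyRange_one] at hx
        exact bodyA_norm n energia robots acc x hx.1 hx.2)
    rw [step1]
    exact loop1_eq n energia robots _ (PySem.List.nodup_pyRange_one 0 n) _
      (fun j _ => PySem.Dict.contains_empty j)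
  rw [h1]
  congr 1
  apply PySem.List.foldl_congr_mem
  intro acc p _
  exact body2_eq n robots acc p
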